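-- pv_equiv track=rewrite | github.com/iqmathanalytics/nexperts_website | _build_course_pages.py | render_path_chips
-- ===== SOURCE A (Python) =====
-- def render_path_chips(chips):
--     out = []
--     for i, (text, kind) in enumerate(chips):
--         if kind == "you":
--             chip = f'<span style="font-size:.75rem;font-weight:700;color:#93c5fd;padding:5px 12px;border:1px solid rgba(29,78,216,.35);border-radius:6px;background:rgba(29,78,216,.14)">{text} ← You</span>'
--         elif kind == "next":
--             chip = f'<span style="font-size:.75rem;font-weight:600;color:#bfdbfe;padding:5px 12px;border:1px solid rgba(30,64,175,.4);border-radius:6px;background:rgba(30,64,175,.15)">{text}</span>'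
--         else:
--             chip = f'<span style="font-size:.75rem;font-weight:600;color:rgba(255,255,255,.4);padding:5px 12px;border:1px solid rgba(255,255,255,.12);border-radius:6px">{text}</span>'
--         out.append(chip)
--         if i < len(chips) - 1:
--             out.append('<span style="color:rgba(255,255,255,.2);font-size:.9rem">→</span>')
--     return "\n        ".join(out)
-- ===== SOURCE B (Python) =====
-- ARROW = '<span style="color:rgba(255,255,255,.2);font-size:.9rem">\u2192</span>'
-- SEP = "\n        "
--
--
-- def _chip(text, kind):
--     # one parameterized span template instead of three literal branches
--     if kind == "you":
--         weight, color, border, bg, tail = (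
--             "700", "#93c5fd", "rgba(29,78,216,.35)",
--             ";background:rgba(29,78,216,.14)", " \u2190 You")
--     elif kind == "next":
--         weight, color, border, bg, tail = (
--             "600", "#bfdbfe", "rgba(30,64,175,.4)",
--             ";background:rgba(30,64,175,.15)", "")
--     else:
--         weight, color, border, bg, tail = (
--             "600", "rgba(255,255,255,.4)", "rgba(255,255,255,.12)", "", "")
--     return (f'<span style="font-size:.75rem;font-weight:{weight};color:{color};'
--             f'padding:5px 12px;border:1px solid {border};border-radius:6px{bg}">'
--             f'{text}{tail}</span>')
--
--
-- def render_path_chips(chips):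
--     # direct recursion on the chip list: no index bookkeeping, no list, no join
--     if not chips:
--         return ""
--     (text, kind), rest = chips[0], chips[1:]
--     head = _chip(text, kind)
--     if not rest:
--         return head
--     return head + SEP + ARROW + SEP + render_path_chips(rest)
-- ===== Notes on version B (the rewrite author's own statement) =====
-- stated objective: alternative
-- what changed: Replaced A's enumerate loop that interleaves arrow separators via an index test and then joins a list, by direct structural recursion on the chip list (no index, no intermediate list, no join), with each chip rendered from one parameterized span template instead of three literal branches.
import Mathlib
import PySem

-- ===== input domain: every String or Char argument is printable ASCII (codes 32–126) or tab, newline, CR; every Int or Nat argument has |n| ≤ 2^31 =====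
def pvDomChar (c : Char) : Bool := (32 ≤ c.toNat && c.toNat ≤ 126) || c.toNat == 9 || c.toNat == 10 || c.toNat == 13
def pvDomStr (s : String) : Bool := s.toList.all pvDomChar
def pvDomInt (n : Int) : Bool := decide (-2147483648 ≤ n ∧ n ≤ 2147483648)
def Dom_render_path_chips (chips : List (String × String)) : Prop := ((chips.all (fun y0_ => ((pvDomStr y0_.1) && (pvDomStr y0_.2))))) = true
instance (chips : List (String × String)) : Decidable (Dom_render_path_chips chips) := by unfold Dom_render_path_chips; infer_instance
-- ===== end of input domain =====

-- B replaces A's enumerate loop (with its last-index arrow test and final join) by direct recursion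
-- on the chip list emitting separators between recursive calls, and renders each chip from one
-- parameterized span template instead of three literal branches (objective: alternative).


-- ===== PORT A =====
def render_path_chips (chips : List (String × String)) : String :=
  let out : List String :=
    (PySem.List.enumerate chips).foldl (fun out p =>
      let i := p.1
      let text := p.2.1
      let kind := p.2.2
      let chip :=
        if kind == "you" then
          "<span style=\"font-size:.75rem;font-weight:700;color:#93c5fd;padding:5px 12px;border:1px solid rgba(29,78,216,.35);border-radius:6px;background:rgba(29,78,216,.14)\">" ++ text ++ " ← You</span>"
        else if kind == "next" then
          "<span style=\"font-size:.75rem;font-weight:600;color:#bfdbfe;padding:5px 12px;border:1px solid rgba(30,64,175,.4);border-radius:6px;background:rgba(30,64,175,.15)\">" ++ text ++ "</span>"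
        else
          "<span style=\"font-size:.75rem;font-weight:600;color:rgba(255,255,255,.4);padding:5px 12px;border:1px solid rgba(255,255,255,.12);border-radius:6px\">" ++ text ++ "</span>"
      let out := out ++ [chip]
      if i < (chips.length : Int) - 1 then
        out ++ ["<span style=\"color:rgba(255,255,255,.2);font-size:.9rem\">→</span>"]
      else out) []
  PySem.Str.join "\n        " out

-- ===== PORT B =====
def pvArrowB : String := "<span style=\"color:rgba(255,255,255,.2);font-size:.9rem\">→</span>"
def pvSepB : String := "\n        "
def pvChipB (text kind : String) : String :=
  let p : String × String × String × String × String :=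
    if kind == "you" then
      ("700", "#93c5fd", "rgba(29,78,216,.35)", ";background:rgba(29,78,216,.14)", " ← You")
    else if kind == "next" then
      ("600", "#bfdbfe", "rgba(30,64,175,.4)", ";background:rgba(30,64,175,.15)", "")
    else
      ("600", "rgba(255,255,255,.4)", "rgba(255,255,255,.12)", "", "")
  match p with
  | (weight, color, border, bg, tail) =>
    "<span style=\"font-size:.75rem;font-weight:" ++ weight ++ ";color:" ++ color ++
      ";padding:5px 12px;border:1px solid " ++ border ++ ";border-radius:6px" ++ bg ++ "\">" ++
      text ++ tail ++ "</span>"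
def render_path_chips_alt : List (String × String) → String
  | [] => ""
  | (text, kind) :: rest =>
    let head := pvChipB text kind
    match rest with
    | [] => head
    | _ => head ++ pvSepB ++ pvArrowB ++ pvSepB ++ render_path_chips_alt rest

-- ===== PRECONDITION & SPEC =====
def Spec_render_path_chips (chips : List (String × String)) (out : String) : Prop := out = render_path_chips_alt chips
instance (chips : List (String × String)) (out : String) : Decidable (Spec_render_path_chips chips out) := by unfold Spec_render_path_chips; infer_instance

-- ===== CLAIM (what is proved, stated in full; the proofs are below) =====
def Claim_equal_render_path_chips : Prop := ∀ (chips : List (String × String)), Dom_render_path_chips chips → Spec_render_path_chips chips (render_path_chips chips)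

-- ===== LEMMAS AND PROOFS =====

-- the per-element renders agree
theorem pvChip_eq (text kind : String) :
    (if kind == "you" then
        "<span style=\"font-size:.75rem;font-weight:700;color:#93c5fd;padding:5px 12px;border:1px solid rgba(29,78,216,.35);border-radius:6px;background:rgba(29,78,216,.14)\">" ++ text ++ " ← You</span>"
      else if kind == "next" then
        "<span style=\"font-size:.75rem;font-weight:600;color:#bfdbfe;padding:5px 12px;border:1px solid rgba(30,64,175,.4);border-radius:6px;background:rgba(30,64,175,.15)\">" ++ text ++ "</span>"
      else
        "<span style=\"font-size:.75rem;font-weight:600;color:rgba(255,255,255,.4);padding:5px 12px;border:1px solid rgba(255,255,255,.12);border-radius:6px\">" ++ text ++ "</span>")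
    = pvChipB text kind := by
  by_cases h1 : kind = "you" <;> by_cases h2 : kind = "next" <;>
    simp [pvChipB, h1, h2, String.append_assoc]

-- A's fold builds the interspersed chip list
theorem pvFold_eq (f : String × String → String) (arrow : String) :
    ∀ (l : List (String × String)) (k : Int) (acc : List String) (n : Int),
    k + l.length = n →
    (PySem.List.enumerate l k).foldl (fun out p =>
        let out := out ++ [f p.2]
        if p.1 < n - 1 then out ++ [arrow] else out) acc
      = acc ++ List.intersperse arrow (l.map f)
  | [], k, acc, n, h => by simp [PySem.List.enumerate]
  | [x], k, acc, n, h => by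
      simp [PySem.List.enumerate] at h ⊢
      omega
  | x :: y :: t, k, acc, n, h => by
      have hk : k < n - 1 := by
        simp [List.length] at h
        omega
      have ih := pvFold_eq f arrow (y :: t) (k + 1) (acc ++ [f x, arrow]) n
        (by simp at h ⊢; omega)
      simp only [PySem.List.enumerate_cons, List.foldl_cons, if_pos hk] at ih ⊢
      rw [show acc ++ [f x] ++ [arrow] = acc ++ [f x, arrow] by simp, ih]
      simp [List.intersperse_cons₂]

-- joining the interspersed chip list is exactly B's recursion
theorem pvJoin_eq_alt :
    ∀ (l : List (String × String)),
      PySem.Str.join pvSepB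
          (List.intersperse pvArrowB (l.map (fun p => pvChipB p.1 p.2)))
        = render_path_chips_alt l
  | [] => by rfl
  | [(text, kind)] => by
      apply String.toList_inj.mp
      rw [PySem.Str.toList_join]
      simp [render_path_chips_alt, PySem.Chars.join_singleton]
  | (text, kind) :: q :: t => by
      have ih := congrArg String.toList (pvJoin_eq_alt (q :: t))
      apply String.toList_inj.mp
      rw [PySem.Str.toList_join] at ih ⊢
      simp only [List.map_cons] at ih ⊢
      have he : List.intersperse pvArrowB
            (pvChipB text kind :: pvChipB q.1 q.2 :: t.map (fun p => pvChipB p.1 p.2))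
          = pvChipB text kind :: pvArrowB ::
              List.intersperse pvArrowB (pvChipB q.1 q.2 :: t.map (fun p => pvChipB p.1 p.2)) := by
        cases t <;> simp [List.intersperse]
      rcases List.exists_cons_of_ne_nil
          (show List.map String.toList
              (List.intersperse pvArrowB (pvChipB q.1 q.2 :: t.map (fun p => pvChipB p.1 p.2))) ≠ [] by
            cases t <;> simp)
          with ⟨h1, t1, ht⟩
      rw [he, List.map_cons, List.map_cons, ht, PySem.Chars.join_cons_cons,
        PySem.Chars.join_cons_cons, ← ht, ih]
      simp [render_path_chips_alt, String.append_assoc]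

-- ===== VERDICT (by name: the statement is the Claim_ definition above) =====
theorem render_path_chips_spec : Claim_equal_render_path_chips := by
  intro chips _
  unfold Spec_render_path_chips render_path_chips
  rw [show (fun (out : List String) (p : Int × (String × String)) =>
        let i := p.1
        let text := p.2.1
        let kind := p.2.2
        let chip :=
          if kind == "you" then
            "<span style=\"font-size:.75rem;font-weight:700;color:#93c5fd;padding:5px 12px;border:1px solid rgba(29,78,216,.35);border-radius:6px;background:rgba(29,78,216,.14)\">" ++ text ++ " ← You</span>"
          else if kind == "next" then
            "<span style=\"font-size:.75rem;font-weight:600;color:#bfdbfe;padding:5px 12px;border:1px solid rgba(30,64,175,.4);border-radius:6px;background:rgba(30,64,175,.15)\">" ++ text ++ "</span>"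
          else
            "<span style=\"font-size:.75rem;font-weight:600;color:rgba(255,255,255,.4);padding:5px 12px;border:1px solid rgba(255,255,255,.12);border-radius:6px\">" ++ text ++ "</span>"
        let out := out ++ [chip]
        if i < (chips.length : Int) - 1 then
          out ++ ["<span style=\"color:rgba(255,255,255,.2);font-size:.9rem\">→</span>"]
        else out)
      = (fun (out : List String) (p : Int × (String × String)) =>
          let out := out ++ [pvChipB p.2.1 p.2.2]
          if p.1 < (chips.length : Int) - 1 then out ++ [pvArrowB] else out) from by
        funext out p
        simp only [pvChip_eq p.2.1 p.2.2, pvArrowB]]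
  rw [pvFold_eq (fun p => pvChipB p.1 p.2) pvArrowB chips 0 [] chips.length (by simp)]
  simp only [List.nil_append]
  exact pvJoin_eq_alt chips
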